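-- pv_equiv track=rewrite | github.com/NightSkumbry/shvetsov | kompege/16/3034.py | f
-- ===== SOURCE A (Python) =====
-- def f(n, m): # Данная функция вернёт все возможные строки из 1 и 0, длинной n, в которых <= m нулей
--     if n == 1:
--         return ['1', '0']
--     ans = []
--     for i in f(n-1, m):
--         if i.count('0') == m:
--             ans += [i+'1']
--         else:
--             ans += [i+'1', i+'0']
--     return ans
-- ===== SOURCE B (Python) =====
-- def f(n, m):
--     # carry each string with its number of zeros, so no rescanning via count()
--     ans = [('1', 0), ('0', 1)]
--     for _length in range(2, n + 1):
--         new = []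
--         for s, z in ans:
--             new.append((s + '1', z))
--             if z != m:
--                 new.append((s + '0', z + 1))
--         ans = new
--     return [s for s, _ in ans]
-- ===== Notes on version B (the rewrite author's own statement) =====
-- stated objective: faster
-- what changed: Replaces A's recursion on n (which never terminates for n < 1) with an iterative rebuild over lengths 2..n that carries each string's zero-count alongside it, so the per-string i.count('0') rescan disappears.
import Mathlib
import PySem

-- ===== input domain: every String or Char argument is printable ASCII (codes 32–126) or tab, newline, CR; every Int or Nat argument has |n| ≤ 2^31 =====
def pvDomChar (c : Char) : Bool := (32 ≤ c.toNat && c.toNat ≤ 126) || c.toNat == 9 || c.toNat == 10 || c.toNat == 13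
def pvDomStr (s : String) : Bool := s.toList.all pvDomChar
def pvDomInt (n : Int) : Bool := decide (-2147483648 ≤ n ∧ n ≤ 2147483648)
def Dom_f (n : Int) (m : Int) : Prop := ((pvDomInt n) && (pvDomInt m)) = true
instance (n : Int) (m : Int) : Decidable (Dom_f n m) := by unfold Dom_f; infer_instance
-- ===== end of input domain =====

-- B replaces A's recursion on n with an iterative rebuild that carries each string's
-- zero-count alongside it, so the per-string count('0') rescan disappears.

-- ===== PORT A =====
-- A recurses on n; for n ≤ 0 the Python diverges (excluded by Pre_f), so the Nat
-- recursion's 0 case returns [] as an arbitrary placeholder never reached under Pre_f.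
def fARec (m : Int) : Nat → List String
  | 0 => []
  | 1 => ["1", "0"]
  | Nat.succ (Nat.succ k) =>
      (fARec m (Nat.succ k)).foldl
        (fun ans i =>
          if ((PySem.Str.count i "0" : Int) == m) then ans ++ [i ++ "1"]
          else ans ++ [i ++ "1", i ++ "0"]) []

def f (n : Int) (m : Int) : List String := fARec m n.toNat

-- ===== PORT B =====
def fStep (m : Int) (ans : List (String × Int)) : List (String × Int) :=
  ans.foldl
    (fun new p =>
      let new1 := new ++ [(p.1 ++ "1", p.2)]
      if (p.2 != m) then new1 ++ [(p.1 ++ "0", p.2 + 1)] else new1)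
    []

def f_alt (n : Int) (m : Int) : List String :=
  ((PySem.List.pyRange 2 (n + 1) 1).foldl (fun ans _ => fStep m ans)
      [("1", (0 : Int)), ("0", (1 : Int))]).map (fun p => p.1)

-- ===== PRECONDITION & SPEC =====
-- Pre_f excludes n < 1, on which Python A recurses without end (RecursionError);
-- B returns ['1', '0'] there.
def Pre_f (n : Int) (m : Int) : Prop := 1 ≤ n
instance (n : Int) (m : Int) : Decidable (Pre_f n m) := by unfold Pre_f; infer_instance
def pvWitness_f : Int × Int := (3, 1)

def Spec_f (n : Int) (m : Int) (out : List String) : Prop := out = f_alt n m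
instance (n : Int) (m : Int) (out : List String) : Decidable (Spec_f n m out) := by unfold Spec_f; infer_instance

-- ===== CLAIM (what is proved, stated in full; the proofs are below) =====
def Claim_equal_f : Prop := ∀ (n : Int) (m : Int), Dom_f n m → Pre_f n m → Spec_f n m (f n m)

-- ===== LEMMAS AND PROOFS =====

-- bridge: the substring counter of PySem, applied to the one-char needle '0',
-- is the character count (count.go with enough fuel scans char by char)
theorem count_go_single (c : Char) :
    ∀ (l : List Char) (fuel acc : Nat), l.length ≤ fuel →
      PySem.Chars.count.go [c] fuel l acc = acc + l.count c := by
  intro l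
  induction l with
  | nil =>
      intro fuel acc _
      cases fuel <;> simp [PySem.Chars.count.go]
  | cons h t ih =>
      intro fuel acc hle
      cases fuel with
      | zero => simp at hle
      | succ fu =>
          have ht : t.length ≤ fu := by simpa using hle
          by_cases hch : c = h
          · subst hch
            have h1 := ih fu (acc + 1) ht
            simp [PySem.Chars.count.go, List.isPrefixOf, h1, List.count_cons]
            omega
          · have hpf : ([c].isPrefixOf (h :: t)) = false := by
              simp [List.isPrefixOf]
              exact fun hh => (hch hh).elim
            have h2 := ih fu acc ht
            simp [PySem.Chars.count.go, hpf, h2, List.count_cons, Ne.symm hch]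

theorem str_count_zero (s : String) :
    PySem.Str.count s "0" = s.toList.count '0' := by
  have h0 : ("0" : String).toList = ['0'] := rfl
  simp only [PySem.Str.count_eq, h0]
  unfold PySem.Chars.count
  have hlen : s.toList.length ≤ s.length := le_of_eq String.length_toList
  simp [count_go_single '0' s.toList s.length 0 hlen]

-- the invariant B maintains: the second component is the string's zero count
def GoodPair (p : String × Int) : Prop := ((p.1.toList.count '0' : Nat) : Int) = p.2

theorem count_append_one (s : String) :
    ((s ++ "1").toList.count '0') = s.toList.count '0' := by
  simp [String.toList_append]

theorem count_append_zero (s : String) :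
    ((s ++ "0").toList.count '0') = s.toList.count '0' + 1 := by
  simp [String.toList_append]

-- one rebuild step of B projects to one recursive step of A
theorem fold_proj (m : Int) :
    ∀ (l accP : List (String × Int)), (∀ p ∈ l, GoodPair p) →
      (l.foldl
        (fun new p =>
          let new1 := new ++ [(p.1 ++ "1", p.2)]
          if (p.2 != m) then new1 ++ [(p.1 ++ "0", p.2 + 1)] else new1)
        accP).map (fun p => p.1)
      = (l.map (fun p => p.1)).foldl
          (fun ans i =>
            if ((PySem.Str.count i "0" : Int) == m) then ans ++ [i ++ "1"]
            else ans ++ [i ++ "1", i ++ "0"]) (accP.map (fun p => p.1)) := by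
  intro l
  induction l with
  | nil => intro accP _; rfl
  | cons p t ih =>
      intro accP hg
      have hp : GoodPair p := hg p (List.mem_cons_self ..)
      have hcond : ((PySem.Str.count p.1 "0" : Int) == m) = (p.2 == m) := by
        rw [str_count_zero]
        unfold GoodPair at hp
        rw [hp]
      simp only [List.foldl_cons, List.map_cons]
      rw [ih _ (fun q hq => hg q (List.mem_cons_of_mem _ hq)), hcond]
      by_cases hm : p.2 = m
      · simp [hm]
      · simp [hm]

-- the invariant is preserved by one rebuild step
theorem fold_good (m : Int) :
    ∀ (l accP : List (String × Int)), (∀ p ∈ l, GoodPair p) → (∀ p ∈ accP, GoodPair p) →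
      ∀ p ∈ (l.foldl
        (fun new p =>
          let new1 := new ++ [(p.1 ++ "1", p.2)]
          if (p.2 != m) then new1 ++ [(p.1 ++ "0", p.2 + 1)] else new1)
        accP), GoodPair p := by
  intro l
  induction l with
  | nil => intro accP _ hacc; simpa using hacc
  | cons p t ih =>
      intro accP hg hacc
      simp only [List.foldl_cons]
      refine ih _ (fun q hq => hg q (List.mem_cons_of_mem _ hq)) ?_
      have hp : GoodPair p := hg p (List.mem_cons_self ..)
      have h1 : GoodPair (p.1 ++ "1", p.2) := by
        unfold GoodPair at hp ⊢
        simp [count_append_one, hp]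
      have h0 : GoodPair (p.1 ++ "0", p.2 + 1) := by
        unfold GoodPair at hp ⊢
        rw [count_append_zero]
        push_cast
        omega
      intro q hq
      by_cases hm : (p.2 != m) = true
      · simp only [hm, if_true, List.mem_append, List.mem_cons,
          List.not_mem_nil, or_false] at hq
        rcases hq with (hq | hq) | hq
        · exact hacc q hq
        · rw [hq]; exact h1
        · rw [hq]; exact h0
      · simp only [hm, if_false, Bool.false_eq_true, List.mem_append, List.mem_cons,
          List.not_mem_nil, or_false] at hq
        rcases hq with hq | hq
        · exact hacc q hq
        · rw [hq]; exact h1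

def fInit : List (String × Int) := [("1", (0 : Int)), ("0", (1 : Int))]

theorem good_iter (m : Int) (k : Nat) : ∀ p ∈ (fStep m)^[k] fInit, GoodPair p := by
  induction k with
  | zero =>
      intro p hp
      simp only [Function.iterate_zero_apply, fInit, List.mem_cons,
        List.not_mem_nil, or_false] at hp
      rcases hp with hp | hp <;> (rw [hp]; unfold GoodPair; decide)
  | succ j ih =>
      rw [Function.iterate_succ_apply']
      exact fold_good m _ [] ih (by intro q hq; cases hq)

theorem fARec_eq_iter (m : Int) (k : Nat) :
    fARec m (k + 1) = ((fStep m)^[k] fInit).map (fun p => p.1) := by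
  induction k with
  | zero => rfl
  | succ j ih =>
      show fARec m (j + 2) = _
      have : fARec m (j + 2)
          = (fARec m (j + 1)).foldl
              (fun ans i =>
                if ((PySem.Str.count i "0" : Int) == m) then ans ++ [i ++ "1"]
                else ans ++ [i ++ "1", i ++ "0"]) [] := rfl
      rw [this, ih, Function.iterate_succ_apply']
      rw [show fStep m ((fStep m)^[j] fInit)
            = ((fStep m)^[j] fInit).foldl
                (fun new p =>
                  let new1 := new ++ [(p.1 ++ "1", p.2)]
                  if (p.2 != m) then new1 ++ [(p.1 ++ "0", p.2 + 1)] else new1) []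
          from rfl]
      rw [fold_proj m _ [] (good_iter m j)]
      rfl

-- a fold whose function ignores the elements only reads the list's length
theorem foldl_const_iterate {α β : Type} (g : β → β) (l : List α) (init : β) :
    l.foldl (fun a _ => g a) init = g^[l.length] init := by
  induction l generalizing init with
  | nil => rfl
  | cons x xs ih => simp [List.foldl_cons, ih, Function.iterate_succ_apply]

theorem f_alt_eq_iter (n m : Int) :
    f_alt n m = ((fStep m)^[(n - 1).toNat] fInit).map (fun p => p.1) := by
  unfold f_alt
  rw [foldl_const_iterate, PySem.List.length_pyRange_one]
  have : (n + 1 - 2).toNat = (n - 1).toNat := by omega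
  rw [this]
  rfl

-- ===== VERDICT (by name: the statement is the Claim_ definition above) =====
theorem f_spec : Claim_equal_f := by
  intro n m _ hpre
  unfold Spec_f f
  rw [f_alt_eq_iter]
  have hn : n.toNat = (n - 1).toNat + 1 := by unfold Pre_f at hpre; omega
  rw [hn, fARec_eq_iter]
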